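-- pv_equiv track=rewrite | github.com/pypi-data/pypi-mirror-403 | packages/albusos/albusos-0.5.1.tar.gz/albusos-0.5.1/src/stdlib/registry.py | _unsanitize_tool_name
-- ===== SOURCE A (Python) =====
-- def _unsanitize_tool_name(name: str) -> str:
--     """Convert OpenAI-format tool name back to internal format."""
--     # Common patterns: pathway_create -> pathway.create
--     for prefix in (
--         "pathway_",
--         "workspace_",
--         "search_",
--         "vision_",
--         "llm_",
--         "code_",
--         "mcp_",
--         "kg_",
--         "memory_",
--         "vector_",
--     ):
--         if name.startswith(prefix):
--             return name.replace("_", ".", 1)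
--     return name
-- ===== SOURCE B (Python) =====
-- _ROOTS = frozenset({"pathway", "workspace", "search", "vision", "llm",
--                     "code", "mcp", "kg", "memory", "vector"})
--
--
-- def _unsanitize_tool_name(name: str) -> str:
--     """Convert OpenAI-format tool name back to internal format."""
--     head, sep, tail = name.partition("_")
--     if sep and head in _ROOTS:
--         return head + "." + tail
--     return name
-- ===== Notes on version B (the rewrite author's own statement) =====
-- stated objective: idiomatic
-- what changed: Replaces the linear scan over ten 'startswith(prefix_)' tests by one partition at the first underscore followed by a single frozenset lookup of the extracted root, rebuilding the name as head+'.'+tail.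
import Mathlib
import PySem

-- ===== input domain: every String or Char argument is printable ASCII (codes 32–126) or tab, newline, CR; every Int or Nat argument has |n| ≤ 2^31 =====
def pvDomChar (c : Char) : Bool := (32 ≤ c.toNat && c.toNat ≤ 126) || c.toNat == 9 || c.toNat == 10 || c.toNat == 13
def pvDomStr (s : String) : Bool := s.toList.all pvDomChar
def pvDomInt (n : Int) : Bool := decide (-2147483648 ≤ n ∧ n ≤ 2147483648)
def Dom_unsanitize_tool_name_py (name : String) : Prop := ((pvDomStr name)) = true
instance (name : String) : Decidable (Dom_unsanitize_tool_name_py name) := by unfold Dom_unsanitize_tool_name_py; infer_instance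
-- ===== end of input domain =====

-- B replaces A's linear scan over ten "startswith" prefixes by one partition at the
-- first underscore plus a single set lookup of the extracted root (idiomatic; same cost).


-- ===== PORT A =====
-- name.replace("_", ".", 1): the old string is the single char '_', so this is exactly
-- "replace the first '_' (if any) by '.'" — hand-ported (PySem has no count-limited replace).
def pvReplaceFirstUnderscore : List Char → List Char
  | [] => []
  | c :: cs => if c = '_' then '.' :: cs else c :: pvReplaceFirstUnderscore cs

-- the 'for prefix in (...)' loop with its early return
def pvGoA (name : String) : List String → String
  | [] => name
  | p :: ps =>
      if PySem.Str.startswith name p then String.ofList (pvReplaceFirstUnderscore name.toList)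
      else pvGoA name ps

def unsanitize_tool_name_py (name : String) : String :=
  pvGoA name ["pathway_", "workspace_", "search_", "vision_", "llm_",
              "code_", "mcp_", "kg_", "memory_", "vector_"]

-- ===== PORT B =====
-- name.partition("_"): (head, found-separator?, tail)
def pvPartitionU : List Char → List Char × Bool × List Char
  | [] => ([], false, [])
  | c :: cs =>
      if c = '_' then ([], true, cs)
      else
        let r := pvPartitionU cs
        (c :: r.1, r.2.1, r.2.2)

def pvRoots : PySem.Set (List Char) :=
  PySem.Set.ofList ["pathway".toList, "workspace".toList, "search".toList, "vision".toList,
    "llm".toList, "code".toList, "mcp".toList, "kg".toList, "memory".toList, "vector".toList]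

def unsanitize_tool_name_py_alt (name : String) : String :=
  let r := pvPartitionU name.toList
  if r.2.1 && PySem.Set.contains pvRoots r.1 then String.ofList (r.1 ++ '.' :: r.2.2)
  else name

-- ===== PRECONDITION & SPEC =====
def Spec_unsanitize_tool_name_py (name : String) (out : String) : Prop := out = unsanitize_tool_name_py_alt name
instance (name : String) (out : String) : Decidable (Spec_unsanitize_tool_name_py name out) := by unfold Spec_unsanitize_tool_name_py; infer_instance

-- ===== CLAIM (what is proved, stated in full; the proofs are below) =====
def Claim_equal_unsanitize_tool_name_py : Prop := ∀ (name : String), Dom_unsanitize_tool_name_py name → Spec_unsanitize_tool_name_py name (unsanitize_tool_name_py name)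


-- ===== LEMMAS AND PROOFS =====

-- the partition characterises each prefix test: name starts with root ++ "_" iff the
-- partition found a '_' and its head is exactly root (root itself underscore-free)
theorem pv_partition_prefix : ∀ (cs root : List Char), '_' ∉ root →
    ((root ++ ['_']) <+: cs ↔ (pvPartitionU cs).2.1 = true ∧ (pvPartitionU cs).1 = root) := by
  intro cs
  induction cs with
  | nil =>
    intro root h
    simp [pvPartitionU]
  | cons c cs ih =>
    intro root h
    cases root with
    | nil =>
      by_cases hc : c = '_'
      · simp [pvPartitionU, hc]
      · simp [pvPartitionU, hc, List.cons_prefix_cons, Ne.symm hc]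
    | cons r rs =>
      have hr : r ≠ '_' := fun e => h (by simp [e])
      have hrs : '_' ∉ rs := fun e => h (List.mem_cons_of_mem _ e)
      by_cases hc : c = '_'
      · subst hc
        simp [pvPartitionU, List.cons_prefix_cons]
        exact fun e => absurd e hr
      · simp only [pvPartitionU, if_neg hc, List.cons_append, List.cons_prefix_cons,
          ih rs hrs]
        constructor
        · rintro ⟨rfl, hs, rfl⟩; exact ⟨hs, rfl⟩
        · rintro ⟨hs, he⟩
          obtain ⟨rfl, rfl⟩ := List.cons.injEq .. ▸ he
          exact ⟨rfl, hs, rfl⟩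

-- Bool form of the previous lemma
theorem pv_sw (cs root : List Char) (h : '_' ∉ root) :
    PySem.Chars.startswith cs (root ++ ['_']) =
      ((pvPartitionU cs).2.1 && ((pvPartitionU cs).1 == root)) := by
  rw [Bool.eq_iff_iff]
  simp [PySem.Chars.startswith_iff, pv_partition_prefix cs root h]

-- when a '_' was found, replacing the first '_' yields head ++ '.' :: tail
theorem pv_replace_eq_partition : ∀ cs : List Char, (pvPartitionU cs).2.1 = true →
    pvReplaceFirstUnderscore cs = (pvPartitionU cs).1 ++ '.' :: (pvPartitionU cs).2.2 := by
  intro cs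
  induction cs with
  | nil => simp [pvPartitionU]
  | cons c cs ih =>
    by_cases hc : c = '_' <;>
      simp [pvPartitionU, pvReplaceFirstUnderscore, hc]
    exact ih

-- ===== VERDICT (by name: the statement is the Claim_ definition above) =====
set_option maxHeartbeats 1000000 in
theorem unsanitize_tool_name_py_spec : Claim_equal_unsanitize_tool_name_py := by
  intro name _
  unfold Spec_unsanitize_tool_name_py unsanitize_tool_name_py unsanitize_tool_name_py_alt
  rcases hpe : pvPartitionU name.toList with ⟨hd, sep, tl⟩
  have h1 : PySem.Str.startswith name "pathway_" = (sep && (hd == "pathway".toList)) := by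
    rw [PySem.Str.startswith_eq, show ("pathway_".toList) = ("pathway".toList ++ ['_']) from by decide,
       pv_sw name.toList "pathway".toList (by decide), hpe]
  have h2 : PySem.Str.startswith name "workspace_" = (sep && (hd == "workspace".toList)) := by
    rw [PySem.Str.startswith_eq, show ("workspace_".toList) = ("workspace".toList ++ ['_']) from by decide,
       pv_sw name.toList "workspace".toList (by decide), hpe]
  have h3 : PySem.Str.startswith name "search_" = (sep && (hd == "search".toList)) := by
    rw [PySem.Str.startswith_eq, show ("search_".toList) = ("search".toList ++ ['_']) from by decide,
       pv_sw name.toList "search".toList (by decide), hpe]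
  have h4 : PySem.Str.startswith name "vision_" = (sep && (hd == "vision".toList)) := by
    rw [PySem.Str.startswith_eq, show ("vision_".toList) = ("vision".toList ++ ['_']) from by decide,
       pv_sw name.toList "vision".toList (by decide), hpe]
  have h5 : PySem.Str.startswith name "llm_" = (sep && (hd == "llm".toList)) := by
    rw [PySem.Str.startswith_eq, show ("llm_".toList) = ("llm".toList ++ ['_']) from by decide,
       pv_sw name.toList "llm".toList (by decide), hpe]
  have h6 : PySem.Str.startswith name "code_" = (sep && (hd == "code".toList)) := by
    rw [PySem.Str.startswith_eq, show ("code_".toList) = ("code".toList ++ ['_']) from by decide,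
       pv_sw name.toList "code".toList (by decide), hpe]
  have h7 : PySem.Str.startswith name "mcp_" = (sep && (hd == "mcp".toList)) := by
    rw [PySem.Str.startswith_eq, show ("mcp_".toList) = ("mcp".toList ++ ['_']) from by decide,
       pv_sw name.toList "mcp".toList (by decide), hpe]
  have h8 : PySem.Str.startswith name "kg_" = (sep && (hd == "kg".toList)) := by
    rw [PySem.Str.startswith_eq, show ("kg_".toList) = ("kg".toList ++ ['_']) from by decide,
       pv_sw name.toList "kg".toList (by decide), hpe]
  have h9 : PySem.Str.startswith name "memory_" = (sep && (hd == "memory".toList)) := by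
    rw [PySem.Str.startswith_eq, show ("memory_".toList) = ("memory".toList ++ ['_']) from by decide,
       pv_sw name.toList "memory".toList (by decide), hpe]
  have h10 : PySem.Str.startswith name "vector_" = (sep && (hd == "vector".toList)) := by
    rw [PySem.Str.startswith_eq, show ("vector_".toList) = ("vector".toList ++ ['_']) from by decide,
       pv_sw name.toList "vector".toList (by decide), hpe]
  simp only [pvGoA, h1, h2, h3, h4, h5, h6, h7, h8, h9, h10]
  cases sep with
  | false => simp
  | true =>
    have hrep : pvReplaceFirstUnderscore name.toList = hd ++ '.' :: tl := by
      have h := pv_replace_eq_partition name.toList (by rw [hpe])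
      rw [hpe] at h; exact h
    rw [hrep]
    simp only [Bool.true_and]
    have hroots : pvRoots = ["pathway".toList, "workspace".toList, "search".toList,
      "vision".toList, "llm".toList, "code".toList, "mcp".toList, "kg".toList,
      "memory".toList, "vector".toList] := by decide
    cases hm : PySem.Set.contains pvRoots hd with
    | true =>
      have hmem : hd ∈ pvRoots := (PySem.Set.contains_iff _ _).mp hm
      rw [hroots] at hmem
      simp only [List.mem_cons, List.not_mem_nil, or_false] at hmem
      rcases hmem with rfl | rfl | rfl | rfl | rfl | rfl | rfl | rfl | rfl | rfl <;>
        simp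
    | false =>
      have hnot : hd ∉ pvRoots := fun h =>
        by rw [(PySem.Set.contains_iff _ _).mpr h] at hm; exact Bool.true_eq_false ▸ hm
      rw [hroots] at hnot
      simp only [List.mem_cons, List.not_mem_nil, or_false, not_or] at hnot
      simp at hnot
      obtain ⟨n1, n2, n3, n4, n5, n6, n7, n8, n9, n10⟩ := hnot
      simp [n1, n2, n3, n4, n5, n6, n7, n8, n9, n10]
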